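-- pv_equiv track=rewrite | github.com/Yaroslam/codeforce | B/D266 800.py | change_queue
-- ===== SOURCE A (Python) =====
-- def change_queue(queue):
--     new_queue = ''
--     i = 0
--     while i <= len(queue) - 1:
--         if i == len(queue)-1:
--             new_queue += queue[i]
--             i+=1
--         elif queue[i] == "B" and queue[i + 1] == "G":
--             new_queue += "G"
--             new_queue += "B"
--             i += 2
--         else:
--             new_queue += queue[i]
--             i += 1
--     return new_queue
-- ===== SOURCE B (Python) =====
-- def change_queue(queue):
--     return queue.replace('BG', 'GB')
-- ===== Notes on version B (the rewrite author's own statement) =====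
-- stated objective: faster
-- what changed: Replaces the hand-written index loop (which swaps each adjacent boy-girl pair and skips two positions, building the result by repeated string concatenation) with a single str.replace call performing the same non-overlapping left-to-right substitution.
import Mathlib
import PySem

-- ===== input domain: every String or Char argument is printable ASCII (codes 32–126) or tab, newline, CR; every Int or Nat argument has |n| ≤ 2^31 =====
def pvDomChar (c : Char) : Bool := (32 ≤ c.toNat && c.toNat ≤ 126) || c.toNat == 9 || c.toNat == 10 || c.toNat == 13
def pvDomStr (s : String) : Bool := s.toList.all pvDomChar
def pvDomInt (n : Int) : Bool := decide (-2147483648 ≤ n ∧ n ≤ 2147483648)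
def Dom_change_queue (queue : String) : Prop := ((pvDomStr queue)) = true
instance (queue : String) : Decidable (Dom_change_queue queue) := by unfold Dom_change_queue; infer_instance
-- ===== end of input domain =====

-- B replaces A's hand-written swap-and-skip index loop with a single str.replace('BG','GB') call (idiomatic).


-- ===== PORT A =====
-- A's while loop over index i, advancing by 2 after a swap, as structural recursion on the
-- remaining characters: [] = loop not entered, [c] = the 'i == len-1' branch, two-element head = the other branches.
def changeGoA : List Char → List Char
  | [] => []
  | [c] => [c]
  | c :: d :: rest =>
    if c = 'B' ∧ d = 'G' then 'G' :: 'B' :: changeGoA rest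
    else c :: changeGoA (d :: rest)

def change_queue (queue : String) : String := String.ofList (changeGoA queue.toList)

-- ===== PORT B =====
def change_queue_alt (queue : String) : String := PySem.Str.replace queue "BG" "GB"

-- ===== PRECONDITION & SPEC =====
def Spec_change_queue (queue : String) (out : String) : Prop := out = change_queue_alt queue
instance (queue : String) (out : String) : Decidable (Spec_change_queue queue out) := by unfold Spec_change_queue; infer_instance

-- ===== CLAIM (what is proved, stated in full; the proofs are below) =====
def Claim_equal_change_queue : Prop := ∀ (queue : String), Dom_change_queue queue → Spec_change_queue queue (change_queue queue)

-- ===== LEMMAS AND PROOFS =====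

theorem changeGoA_eq_go (fuel : Nat) : ∀ (l acc : List Char), l.length ≤ fuel →
    PySem.Chars.replace.go ['B','G'] ['G','B'] fuel l acc = acc.reverse ++ changeGoA l := by
  induction fuel with
  | zero =>
    intro l acc h
    have : l = [] := List.eq_nil_of_length_eq_zero (Nat.le_zero.mp h)
    subst this
    simp [PySem.Chars.replace.go, changeGoA]
  | succ fuel ih =>
    intro l acc h
    match l with
    | [] => simp [PySem.Chars.replace.go, changeGoA]
    | [c] =>
      simp only [PySem.Chars.replace.go, List.isPrefixOf]
      rw [if_neg (by simp), ih [] (c :: acc) (by simp)]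
      simp [changeGoA]
    | c :: d :: rest =>
      simp only [List.length_cons] at h
      by_cases hbg : c = 'B' ∧ d = 'G'
      · obtain ⟨hc, hd⟩ := hbg
        subst hc; subst hd
        simp only [PySem.Chars.replace.go, List.isPrefixOf]
        rw [if_pos (by simp)]
        rw [show List.drop ['B','G'].length ('B' :: 'G' :: rest) = rest from rfl]
        rw [ih rest (['G','B'].reverse ++ acc) (by omega)]
        simp [changeGoA]
      · have hpre : ['B','G'].isPrefixOf (c :: d :: rest) = false := by
          simp [List.isPrefixOf]
          intro hc hd
          exact absurd ⟨hc.symm, hd.symm⟩ hbg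
        simp only [PySem.Chars.replace.go, hpre, Bool.false_eq_true, if_false]
        rw [ih (d :: rest) (c :: acc) (by simp; omega)]
        simp [changeGoA, hbg]

theorem changeGoA_eq_replace (l : List Char) :
    changeGoA l = PySem.Chars.replace l ['B','G'] ['G','B'] := by
  rw [PySem.Chars.replace]
  simp [changeGoA_eq_go l.length l [] (le_refl _)]

-- ===== VERDICT (by name: the statement is the Claim_ definition above) =====
theorem change_queue_spec : Claim_equal_change_queue := by
  intro queue _
  unfold Spec_change_queue change_queue change_queue_alt PySem.Str.replace
  rw [changeGoA_eq_replace]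
  rfl
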